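-- pv_equiv track=rewrite | github.com/rafamdr/coding_chanllenges | largestRect/main.py | largest_rect_v2
-- ===== SOURCE A (Python) =====
-- from typing import List
--
-- def largest_rect_v2(grid: List[List[int]]) -> str:
--     rows, cols = len(grid), len(grid[0])
--     grid_result = [[0 for _ in range(0, cols)] for _ in range(0, rows)]
--     grid_lines = [[0 for _ in range(0, cols)] for _ in range(0, rows)]
--     max_col_count = max_row_count = 0
--     for i in range(0, rows):
--         grid_cols = [0 for _ in range(0, cols)]
--         for j in range(0, cols):
--             if grid[i][j] != 0:
--                 grid_lines[i][j] = 1 if i == 0 else grid_lines[i - 1][j] + 1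
--                 grid_cols[j] = 1 if j == 0 else grid_cols[j - 1] + 1
--             grid_result[i][j] = max(grid_lines[i][j], grid_cols[j])
--             if (grid_lines[i][j] * grid_cols[j]) > (max_row_count * max_col_count):
--                 max_row_count, max_col_count = grid_lines[i][j], grid_cols[j]
--     return f'{max_row_count}x{max_col_count}'
-- ===== SOURCE B (Python) =====
-- from typing import List
--
-- def largest_rect_v2(grid: List[List[int]]) -> str:
--     # Brute force: for each nonzero cell, count its vertical run upward and its
--     # horizontal run leftward directly (no run matrices / DP), keep the best product.
--     cols = len(grid[0])
--     best = (0, 0)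
--     for i in range(len(grid)):
--         for j in range(cols):
--             if grid[i][j] != 0:
--                 u, k = 0, i
--                 while k >= 0 and grid[k][j] != 0:
--                     u += 1
--                     k -= 1
--                 l, k = 0, j
--                 while k >= 0 and grid[i][k] != 0:
--                     l += 1
--                     k -= 1
--                 if u * l > best[0] * best[1]:
--                     best = (u, l)
--     return f'{best[0]}x{best[1]}'
-- ===== Notes on version B (the rewrite author's own statement) =====
-- stated objective: simpler
-- what changed: A builds DP run matrices (grid_lines, grid_cols, plus an unused grid_result) in one fused indexed pass; B drops all auxiliary matrices and, for each nonzero cell, counts its vertical run by scanning upward and its horizontal run by scanning leftward with plain while loops, updating the best product in the same row-major order.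
import Mathlib
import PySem

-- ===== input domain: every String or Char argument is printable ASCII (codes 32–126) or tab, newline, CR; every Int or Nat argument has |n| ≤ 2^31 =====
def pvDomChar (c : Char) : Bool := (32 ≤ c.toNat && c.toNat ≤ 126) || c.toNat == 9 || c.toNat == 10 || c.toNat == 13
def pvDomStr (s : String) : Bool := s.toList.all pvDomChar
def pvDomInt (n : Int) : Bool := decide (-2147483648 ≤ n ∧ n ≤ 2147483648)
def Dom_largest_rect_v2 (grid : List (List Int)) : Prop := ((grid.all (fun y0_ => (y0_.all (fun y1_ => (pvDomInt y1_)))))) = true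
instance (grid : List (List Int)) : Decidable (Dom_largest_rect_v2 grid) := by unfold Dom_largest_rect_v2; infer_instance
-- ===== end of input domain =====

-- B replaces A's fused DP pass (run matrices grid_lines/grid_cols plus an unused grid_result)
-- by direct per-cell counting: for each nonzero cell it scans upward and leftward to measure
-- the two runs, keeping the best product in the same row-major order; simpler, not faster.

-- ===== PORT A =====
-- inner loop over one row: state = (grid_lines row built so far, grid_cols[j-1], best pair);
-- iterates over row paired with the previous grid_lines row
def pvAInner (row prev : List Int) (colPrev : Int) (best : Int × Int) : List Int × (Int × Int) :=
  match row, prev with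
  | c :: cs, p :: ps =>
    let l : Int := if c ≠ 0 then p + 1 else 0          -- grid_lines[i][j]
    let col : Int := if c ≠ 0 then colPrev + 1 else 0  -- grid_cols[j]
    let best' := if best.1 * best.2 < l * col then (l, col) else best
    let r := pvAInner cs ps col best'
    (l :: r.1, r.2)
  | _, _ => ([], best)

-- outer loop over the rows: state = (previous grid_lines row, best pair)
def pvAOuter (rows : List (List Int)) (prev : List Int) (best : Int × Int) : Int × Int :=
  match rows with
  | [] => best
  | r :: rs =>
    let s := pvAInner r prev 0 best
    pvAOuter rs s.1 s.2

def largest_rect_v2 (grid : List (List Int)) : String :=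
  let cols := (grid.headD []).length   -- len(grid[0]): Pre_ excludes the empty grid, where Python raises
  let best := pvAOuter grid (List.replicate cols 0) (0, 0)
  PySem.Int.toStr best.1 ++ "x" ++ PySem.Int.toStr best.2

-- ===== PORT B =====
def pvCell (grid : List (List Int)) (i j : Nat) : Int := (grid.getD i []).getD j 0

-- the 'while k >= 0 and grid[k][j] != 0' upward scan, as recursion on k
def pvUp (grid : List (List Int)) (j : Nat) : Nat → Int
  | 0 => if pvCell grid 0 j = 0 then 0 else 1
  | i + 1 => if pvCell grid (i + 1) j = 0 then 0 else 1 + pvUp grid j i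

-- the 'while k >= 0 and grid[i][k] != 0' leftward scan, as recursion on k
def pvLeft (row : List Int) : Nat → Int
  | 0 => if row.getD 0 0 = 0 then 0 else 1
  | j + 1 => if row.getD (j + 1) 0 = 0 then 0 else 1 + pvLeft row j

-- 'for j in range(cols)': first arg is the remaining count, second the current j
def pvBInner (grid : List (List Int)) (i : Nat) (row : List Int) : Nat → Nat → (Int × Int) → (Int × Int)
  | 0, _, best => best
  | n + 1, j, best =>
    let best' :=
      if pvCell grid i j = 0 then best
      else
        let u := pvUp grid j i
        let l := pvLeft row j
        if best.1 * best.2 < u * l then (u, l) else best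
    pvBInner grid i row n (j + 1) best'

-- 'for i in range(len(grid))'
def pvBOuter (grid : List (List Int)) (cols : Nat) : Nat → Nat → (Int × Int) → (Int × Int)
  | 0, _, best => best
  | m + 1, i, best => pvBOuter grid cols m (i + 1) (pvBInner grid i (grid.getD i []) cols 0 best)

def largest_rect_v2_alt (grid : List (List Int)) : String :=
  let cols := (grid.headD []).length   -- len(grid[0]): Pre_ excludes the empty grid, where Python raises
  let best := pvBOuter grid cols grid.length 0 (0, 0)
  PySem.Int.toStr best.1 ++ "x" ++ PySem.Int.toStr best.2

-- ===== PRECONDITION & SPEC =====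
-- Pre_ excludes exactly the inputs on which Python A raises IndexError: the empty grid
-- (grid[0]) and ragged grids with a row shorter than the first row (grid[i][j] for j < cols).
def Pre_largest_rect_v2 (grid : List (List Int)) : Prop :=
  grid ≠ [] ∧ ∀ r ∈ grid, (grid.headD []).length ≤ r.length
instance (grid : List (List Int)) : Decidable (Pre_largest_rect_v2 grid) := by
  unfold Pre_largest_rect_v2; infer_instance

def pvWitness_largest_rect_v2 : List (List Int) := [[1, 0, 1], [1, 1, 0], [0, 1, 1]]

def Spec_largest_rect_v2 (grid : List (List Int)) (out : String) : Prop := out = largest_rect_v2_alt grid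
instance (grid : List (List Int)) (out : String) : Decidable (Spec_largest_rect_v2 grid out) := by unfold Spec_largest_rect_v2; infer_instance

-- ===== CLAIM (what is proved, stated in full; the proofs are below) =====
def Claim_equal_largest_rect_v2 : Prop := ∀ (grid : List (List Int)), Dom_largest_rect_v2 grid → Pre_largest_rect_v2 grid → Spec_largest_rect_v2 grid (largest_rect_v2 grid)

-- ===== LEMMAS AND PROOFS =====

theorem pvUp_nonneg (grid : List (List Int)) (j i : Nat) : 0 ≤ pvUp grid j i := by
  induction i with
  | zero => simp only [pvUp]; split_ifs <;> omega
  | succ i ih => simp only [pvUp]; split_ifs <;> omega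

theorem pvLeft_nonneg (row : List Int) (j : Nat) : 0 ≤ pvLeft row j := by
  induction j with
  | zero => simp only [pvLeft]; split_ifs <;> omega
  | succ j ih => simp only [pvLeft]; split_ifs <;> omega

-- one row of A's fused DP loop versus B's per-cell counting loop
theorem pv_inner_eq (grid : List (List Int)) (i : Nat) (fullrow : List Int)
    (hrow : fullrow = grid.getD i []) :
    ∀ (n j : Nat) (prevS : List Int) (colPrev : Int) (best : Int × Int),
      prevS.length = n →
      j + n ≤ fullrow.length →
      (∀ m, m < n → prevS.getD m 0 = (if i = 0 then 0 else pvUp grid (j + m) (i - 1))) →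
      colPrev = (match j with | 0 => (0 : Int) | Nat.succ j' => pvLeft fullrow j') →
      0 ≤ best.1 → 0 ≤ best.2 →
      (pvAInner (fullrow.drop j) prevS colPrev best).1.length = n ∧
      (∀ m, m < n → (pvAInner (fullrow.drop j) prevS colPrev best).1.getD m 0 = pvUp grid (j + m) i) ∧
      (pvAInner (fullrow.drop j) prevS colPrev best).2 = pvBInner grid i fullrow n j best ∧
      0 ≤ (pvAInner (fullrow.drop j) prevS colPrev best).2.1 ∧
      0 ≤ (pvAInner (fullrow.drop j) prevS colPrev best).2.2 := by
  intro n
  induction n with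
  | zero =>
    intro j prevS colPrev best hlen _ _ _ hb1 hb2
    have : prevS = [] := List.eq_nil_of_length_eq_zero hlen
    subst this
    cases fullrow.drop j <;>
      simp [pvAInner, pvBInner, hb1, hb2]
  | succ n ih =>
    intro j prevS colPrev best hlen hle hprev hcol hb1 hb2
    obtain ⟨p, ps, rfl⟩ : ∃ p ps, prevS = p :: ps := by
      cases prevS with
      | nil => simp at hlen
      | cons a b => exact ⟨a, b, rfl⟩
    have hps : ps.length = n := by simpa using hlen
    have hj : j < fullrow.length := by omega
    have hdrop : fullrow.drop j = fullrow[j] :: fullrow.drop (j + 1) :=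
      List.drop_eq_getElem_cons hj
    have hcgetD : fullrow.getD j 0 = fullrow[j] := List.getD_eq_getElem _ _ hj
    have hcget' : fullrow[j]? = some fullrow[j] := List.getElem?_eq_getElem hj
    have hcell : pvCell grid i j = fullrow[j] := by
      unfold pvCell; rw [← hrow]; exact hcgetD
    set c := fullrow[j] with hc
    -- the value of grid_lines[i][j] computed by A equals pvUp grid j i
    have hp0 : p = (if i = 0 then 0 else pvUp grid j (i - 1)) := by
      have := hprev 0 (by omega)
      simpa using this
    have hl : (if c ≠ 0 then p + 1 else 0) = pvUp grid j i := by
      by_cases hc0 : c = 0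
      · cases i with
        | zero => simp only [pvUp]; rw [hcell]; simp [hc0]
        | succ i' => simp only [pvUp]; rw [hcell]; simp [hc0]
      · cases i with
        | zero => simp only [pvUp]; rw [hcell]; simp [hc0, hp0]
        | succ i' =>
          simp only [pvUp]; rw [hcell]
          simp only [hp0]
          simp [hc0]
          ring
    -- the value of grid_cols[j] computed by A equals pvLeft fullrow j
    have hcolv : (if c ≠ 0 then colPrev + 1 else 0) = pvLeft fullrow j := by
      by_cases hc0 : c = 0
      · cases j with
        | zero => simp only [pvLeft]; rw [hcgetD]; simp [hc0]
        | succ j' => simp only [pvLeft]; rw [hcgetD]; simp [hc0]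
      · cases j with
        | zero => simp only [pvLeft]; rw [hcgetD]; simp [hc0, hcol]
        | succ j' =>
          simp only [pvLeft]; rw [hcgetD]
          simp only [hcol]
          simp [hc0]
          ring
    rw [hdrop]
    simp only [pvAInner]
    -- A's updated best equals B's updated best
    have hbest' :
        (if best.1 * best.2 < (if c ≠ 0 then p + 1 else 0) * (if c ≠ 0 then colPrev + 1 else 0)
          then ((if c ≠ 0 then p + 1 else 0), (if c ≠ 0 then colPrev + 1 else 0)) else best) =
        (if pvCell grid i j = 0 then best
         else if best.1 * best.2 < pvUp grid j i * pvLeft fullrow j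
           then (pvUp grid j i, pvLeft fullrow j) else best) := by
      by_cases hc0 : c = 0
      · have : ¬ best.1 * best.2 < 0 := by
          have := mul_nonneg hb1 hb2; omega
        simp [hc0, hcell, this]
      · rw [hl, hcolv, hcell]; simp [hc0]
    set bestA := (if best.1 * best.2 < (if c ≠ 0 then p + 1 else 0) * (if c ≠ 0 then colPrev + 1 else 0)
          then ((if c ≠ 0 then p + 1 else 0), (if c ≠ 0 then colPrev + 1 else 0)) else best) with hbA
    have hbA1 : 0 ≤ bestA.1 := by
      rw [hbest']; split_ifs
      · exact hb1
      · exact pvUp_nonneg _ _ _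
      · exact hb1
    have hbA2 : 0 ≤ bestA.2 := by
      rw [hbest']; split_ifs
      · exact hb2
      · exact pvLeft_nonneg _ _
      · exact hb2
    have hrec := ih (j + 1) ps (if c ≠ 0 then colPrev + 1 else 0) bestA hps (by omega)
      (by
        intro m hm
        have := hprev (m + 1) (by omega)
        simpa [Nat.add_assoc, Nat.add_comm 1 m] using this)
      (by simp [hcolv])
      hbA1 hbA2
    obtain ⟨hlen', hget', heq', hn1', hn2'⟩ := hrec
    refine ⟨by simpa using hlen', ?_, ?_, hn1', hn2'⟩
    · intro m hm
      cases m with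
      | zero => simpa using hl
      | succ m' =>
        have := hget' m' (by omega)
        simpa [Nat.add_assoc, Nat.add_comm 1 m'] using this
    · rw [heq']
      simp only [pvBInner]
      exact congrArg (pvBInner grid i fullrow n (j + 1)) (hbA.symm.trans hbest')

-- the whole of A's fused loop equals B's double loop
theorem pv_outer_eq (grid : List (List Int)) (cols : Nat)
    (hlen : ∀ r ∈ grid, cols ≤ r.length) :
    ∀ (m i : Nat) (prev : List Int) (best : Int × Int),
      grid.length = i + m →
      prev.length = cols →
      (∀ k, k < cols → prev.getD k 0 = (if i = 0 then 0 else pvUp grid k (i - 1))) →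
      0 ≤ best.1 → 0 ≤ best.2 →
      pvAOuter (grid.drop i) prev best = pvBOuter grid cols m i best := by
  intro m
  induction m with
  | zero =>
    intro i prev best hm _ _ _ _
    have : grid.drop i = [] := List.drop_eq_nil_of_le (by omega)
    simp [this, pvAOuter, pvBOuter]
  | succ m ih =>
    intro i prev best hm hplen hprev hb1 hb2
    have hi : i < grid.length := by omega
    have hdrop : grid.drop i = grid[i] :: grid.drop (i + 1) := List.drop_eq_getElem_cons hi
    have hget : grid.getD i [] = grid[i] := List.getD_eq_getElem _ _ hi
    have hmem : grid[i] ∈ grid := List.getElem_mem hi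
    have hcols : cols ≤ grid[i].length := hlen _ hmem
    have hin := pv_inner_eq grid i (grid.getD i []) rfl cols 0 prev 0 best hplen
      (by rw [hget]; omega)
      (by intro m' hm'; simpa using hprev m' hm')
      rfl hb1 hb2
    obtain ⟨hlen', hget', heq', hn1', hn2'⟩ := hin
    rw [hdrop]
    simp only [pvAOuter]
    have hdrop0 : (grid.getD i []).drop 0 = grid[i] := by rw [List.drop_zero]; exact hget
    rw [hdrop0] at hlen' hget' heq' hn1' hn2'
    rw [heq'] at hn1' hn2' ⊢
    simp only [pvBOuter]
    exact ih (i + 1) _ _ (by omega) hlen'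
      (by intro k hk; simpa using hget' k hk) hn1' hn2'

-- ===== VERDICT (by name: the statement is the Claim_ definition above) =====
theorem largest_rect_v2_spec : Claim_equal_largest_rect_v2 := by
  intro grid _ hpre
  obtain ⟨hne, hlenall⟩ := hpre
  unfold Spec_largest_rect_v2 largest_rect_v2 largest_rect_v2_alt
  dsimp only
  have := pv_outer_eq grid (grid.headD []).length hlenall grid.length 0
    (List.replicate (grid.headD []).length 0) (0, 0) (by omega) (by simp)
    (by intro k hk; simp) (by norm_num) (by norm_num)
  rw [List.drop_zero] at this
  rw [this]
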